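-- pv_equiv track=rewrite | github.com/PurvaT-11/research-assitant | agent.py | deduplicate_claims
-- ===== SOURCE A (Python) =====
-- def deduplicate_claims(claims):
--     unique = []
--
--     for c in claims:
--         is_duplicate = False
--
--         words_current = set(c["claim"].lower().split())
--
--         for u in unique:
--             words_other = set(u["claim"].lower().split())
--             overlap = len(words_current & words_other)
--
--             if overlap > 6:
--                 is_duplicate = True
--                 break
--
--         if not is_duplicate:
--             unique.append(c)
--
--     return unique
-- ===== SOURCE B (Python) =====
-- def deduplicate_claims(claims):
--     unique = []
--     index = {}  # word -> set of indices of kept claims containing that word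
--
--     for c in claims:
--         words = set(c["claim"].lower().split())
--
--         tally = {}
--         for w in words:
--             for i in index.get(w, ()):
--                 tally[i] = tally.get(i, 0) + 1
--
--         if not any(v > 6 for v in tally.values()):
--             idx = len(unique)
--             unique.append(c)
--             for w in words:
--                 index.setdefault(w, set()).add(idx)
--
--     return unique
-- ===== Notes on version B (the rewrite author's own statement) =====
-- stated objective: alternative
-- what changed: Replaced A's nested scan that recomputes each kept claim's word set and intersects it with the incoming claim by an inverted index from word to the set of kept-claim indices: each incoming claim's word set is tallied against the postings once, and a claim is a duplicate iff some kept claim's tally exceeds 6.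
import Mathlib
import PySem

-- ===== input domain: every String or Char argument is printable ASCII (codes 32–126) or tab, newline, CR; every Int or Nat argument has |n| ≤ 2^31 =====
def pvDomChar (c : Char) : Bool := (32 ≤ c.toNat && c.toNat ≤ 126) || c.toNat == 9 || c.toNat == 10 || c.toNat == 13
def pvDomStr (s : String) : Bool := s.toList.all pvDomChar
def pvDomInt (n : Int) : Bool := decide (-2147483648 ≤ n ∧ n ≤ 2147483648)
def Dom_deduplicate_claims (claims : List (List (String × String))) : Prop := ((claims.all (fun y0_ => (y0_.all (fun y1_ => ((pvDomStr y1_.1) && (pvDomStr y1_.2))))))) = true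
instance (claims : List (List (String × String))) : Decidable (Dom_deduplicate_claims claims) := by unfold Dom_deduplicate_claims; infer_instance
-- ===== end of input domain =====

-- B replaces A's nested pairwise set-intersection scan with an inverted index (word -> set of
-- kept-claim indices) and a per-claim tally; the objective is speed on claim lists with repeated overlap checks.


-- ===== PORT A =====
-- set(c["claim"].lower().split()); under Pre_ the key "claim" is present, so getD's default is never read
def pvWords (c : List (String × String)) : PySem.Set String :=
  PySem.Set.ofList (PySem.Str.split₀ (PySem.Str.lower ((PySem.Dict.mk c).getD "claim" "")))

-- A's inner 'for u in unique: … break' loop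
def pvIsDupA (words : PySem.Set String) : List (List (String × String)) → Bool
  | [] => false
  | u :: rest =>
    if 6 < PySem.Set.len (PySem.Set.inter words (pvWords u)) then true
    else pvIsDupA words rest

def deduplicate_claims (claims : List (List (String × String))) : List (List (String × String)) :=
  claims.foldl (fun unique c =>
    let words := pvWords c
    if pvIsDupA words unique then unique else unique ++ [c]) []

-- ===== PORT B =====
-- tally[i] = tally.get(i, 0) + 1 for each i in the postings of each word of the claim
def pvTally (index : PySem.Dict String (PySem.Set Nat)) (words : PySem.Set String) :
    PySem.Dict Nat Int :=
  words.foldl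
    (fun t w => (index.getD w PySem.Set.empty).foldl (fun t i => t.modify i 0 (· + 1)) t)
    PySem.Dict.empty

-- index.setdefault(w, set()).add(idx) for each word of the kept claim
def pvAddWords (index : PySem.Dict String (PySem.Set Nat)) (words : PySem.Set String)
    (idx : Nat) : PySem.Dict String (PySem.Set Nat) :=
  words.foldl (fun ix w => ix.insert w (PySem.Set.add (ix.getD w PySem.Set.empty) idx)) index

def pvStepB (st : List (List (String × String)) × PySem.Dict String (PySem.Set Nat))
    (c : List (String × String)) :
    List (List (String × String)) × PySem.Dict String (PySem.Set Nat) :=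
  let words := pvWords c
  let tally := pvTally st.2 words
  if tally.values.any (fun v => 6 < v) then st
  else (st.1 ++ [c], pvAddWords st.2 words st.1.length)

def deduplicate_claims_alt (claims : List (List (String × String))) :
    List (List (String × String)) :=
  (claims.foldl pvStepB ([], PySem.Dict.empty)).1

-- ===== PRECONDITION & SPEC =====
-- Pre_ excludes exactly the inputs on which Python A raises KeyError: a claim dict without the key "claim".
def Pre_deduplicate_claims (claims : List (List (String × String))) : Prop :=
  ∀ c ∈ claims, (PySem.Dict.mk c).contains "claim" = true
instance (claims : List (List (String × String))) : Decidable (Pre_deduplicate_claims claims) := by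
  unfold Pre_deduplicate_claims; infer_instance
def pvWitness_deduplicate_claims : (List (List (String × String))) :=
  [[("claim", "solar power is clean")], [("claim", "solar power is clean energy today")]]

def Spec_deduplicate_claims (claims : List (List (String × String))) (out : List (List (String × String))) : Prop := out = deduplicate_claims_alt claims
instance (claims : List (List (String × String))) (out : List (List (String × String))) : Decidable (Spec_deduplicate_claims claims out) := by unfold Spec_deduplicate_claims; infer_instance

-- ===== CLAIM (what is proved, stated in full; the proofs are below) =====
def Claim_equal_deduplicate_claims : Prop := ∀ (claims : List (List (String × String))), Dom_deduplicate_claims claims → Pre_deduplicate_claims claims → Spec_deduplicate_claims claims (deduplicate_claims claims)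

-- ===== LEMMAS AND PROOFS =====

-- the invariant tying B's inverted index to the list of kept claims
def pvInv (unique : List (List (String × String)))
    (index : PySem.Dict String (PySem.Set Nat)) : Prop :=
  (∀ w : String, (index.getD w PySem.Set.empty).Nodup) ∧
  (∀ (w : String) (i : Nat), i ∈ index.getD w PySem.Set.empty ↔
      ∃ h : i < unique.length, w ∈ pvWords unique[i])

lemma pvTally_eq_counter (index : PySem.Dict String (PySem.Set Nat))
    (words : PySem.Set String) :
    pvTally index words =
      PySem.Dict.counter (words.flatMap (fun w => index.getD w PySem.Set.empty)) := by
  unfold pvTally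
  rw [PySem.Dict.counter_eq_foldl, List.foldl_flatMap]

lemma pvIsDupA_iff (words : PySem.Set String) (unique : List (List (String × String))) :
    pvIsDupA words unique = true ↔
      ∃ u ∈ unique, 6 < PySem.Set.len (PySem.Set.inter words (pvWords u)) := by
  induction unique with
  | nil => simp [pvIsDupA]
  | cons u rest ih =>
    simp only [pvIsDupA, List.mem_cons]
    split
    · simp_all
    · simp_all

lemma pvDecision_eq (unique : List (List (String × String)))
    (index : PySem.Dict String (PySem.Set Nat)) (hinv : pvInv unique index)
    (words : PySem.Set String) :
    ((pvTally index words).values.any (fun v => 6 < v)) = pvIsDupA words unique := by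
  obtain ⟨hnd, hmem⟩ := hinv
  set L := words.flatMap (fun w => index.getD w PySem.Set.empty) with hL
  have hcount : ∀ i : Nat, L.count i =
      if h : i < unique.length then words.countP (fun w => decide (w ∈ pvWords unique[i]))
      else 0 := by
    intro i
    rw [hL, List.count_flatMap]
    have hmap : ∀ w ∈ words, (List.count i ∘ fun w => index.getD w PySem.Set.empty) w =
        (if h : i < unique.length then (if decide (w ∈ pvWords unique[i]) then 1 else 0) else 0) := by
      intro w _
      simp only [Function.comp]
      by_cases hin : i ∈ index.getD w PySem.Set.empty
      · obtain ⟨hi, hwi⟩ := (hmem w i).1 hin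
        rw [List.count_eq_one_of_mem (hnd w) hin]
        simp [hi, hwi]
      · rw [List.count_eq_zero_of_not_mem hin]
        by_cases hi : i < unique.length
        · have : ¬ w ∈ pvWords unique[i] := fun hwi => hin ((hmem w i).2 ⟨hi, hwi⟩)
          simp [hi, this]
        · simp [hi]
    rw [List.map_congr_left hmap]
    by_cases hi : i < unique.length
    · simp only [hi, dif_pos]
      exact PySem.List.sum_map_ite_one_zero_nat _ _
    · simp [hi]
  have hinter : ∀ u : List (String × String),
      PySem.Set.len (PySem.Set.inter words (pvWords u)) =
        (words.countP (fun w => decide (w ∈ pvWords u)) : Int) := by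
    intro u
    have h1 : PySem.Set.inter words (pvWords u) = words.filter (fun w => (pvWords u).contains w) := rfl
    simp only [PySem.Set.len, h1, ← List.countP_eq_length_filter]
    exact congrArg (fun n : Nat => (n : Int))
      (List.countP_congr (fun w _ => by simp))
  have hB : ((PySem.Dict.counter L).values.any (fun v => 6 < v) = true) ↔
      ∃ k, k ∈ L ∧ 6 < L.count k := by
    rw [PySem.Dict.values_eq_map_keys _ (PySem.Dict.nodup_keys_counter L) 0, List.any_eq_true]
    constructor
    · rintro ⟨v, hv, h6⟩
      obtain ⟨k, hk, rfl⟩ := List.mem_map.1 hv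
      rw [PySem.Dict.keys_counter, PySem.Set.mem_ofList] at hk
      rw [PySem.Dict.getD_counter] at h6
      simp only [decide_eq_true_eq] at h6
      exact ⟨k, hk, by exact_mod_cast h6⟩
    · rintro ⟨k, hk, h6⟩
      refine ⟨((PySem.Dict.counter L).getD k 0), List.mem_map.2 ⟨k, ?_, rfl⟩, ?_⟩
      · rw [PySem.Dict.keys_counter, PySem.Set.mem_ofList]; exact hk
      · rw [PySem.Dict.getD_counter]
        simp only [decide_eq_true_eq]
        exact_mod_cast h6
  rw [Bool.eq_iff_iff, pvTally_eq_counter, ← hL, hB, pvIsDupA_iff]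
  constructor
  · rintro ⟨k, hk, h6⟩
    rw [hcount k] at h6
    by_cases hi : k < unique.length
    · simp only [hi, dif_pos] at h6
      refine ⟨unique[k], List.getElem_mem hi, ?_⟩
      rw [hinter]
      exact_mod_cast h6
    · simp [hi] at h6
  · rintro ⟨u, hu, h6⟩
    obtain ⟨i, hi, rfl⟩ := List.mem_iff_getElem.1 hu
    rw [hinter] at h6
    have h6' : 6 < words.countP (fun w => decide (w ∈ pvWords unique[i])) := by exact_mod_cast h6
    refine ⟨i, ?_, ?_⟩
    · rw [← List.count_pos_iff, hcount i]
      simp only [hi, dif_pos]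
      omega
    · rw [hcount i]
      simp only [hi, dif_pos]
      exact h6'

lemma pvAddWords_getD (words : List String) (hw : words.Nodup)
    (index : PySem.Dict String (PySem.Set Nat)) (idx : Nat) (w : String) :
    (pvAddWords index words idx).getD w PySem.Set.empty =
      if w ∈ words then PySem.Set.add (index.getD w PySem.Set.empty) idx
      else index.getD w PySem.Set.empty := by
  induction words generalizing index with
  | nil => simp [pvAddWords]
  | cons w' ws ih =>
    simp only [List.nodup_cons] at hw
    show (pvAddWords (index.insert w' _) ws idx).getD w PySem.Set.empty = _
    rw [ih hw.2]
    by_cases hmem : w ∈ ws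
    · have hne : w ≠ w' := fun h => hw.1 (h ▸ hmem)
      simp [hmem, hne, PySem.Dict.getD_insert]
    · by_cases hww : w = w'
      · subst hww; simp [hmem]
      · simp [hmem, hww, PySem.Dict.getD_insert]

lemma pvInv_step (unique : List (List (String × String)))
    (index : PySem.Dict String (PySem.Set Nat)) (hinv : pvInv unique index)
    (c : List (String × String)) :
    pvInv (unique ++ [c]) (pvAddWords index (pvWords c) unique.length) := by
  obtain ⟨hnd, hmem⟩ := hinv
  have hw : (pvWords c).Nodup := PySem.Set.nodup_ofList _
  constructor
  · intro w
    rw [pvAddWords_getD _ hw]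
    split
    · exact PySem.Set.nodup_add _ _ (hnd w)
    · exact hnd w
  · intro w i
    rw [pvAddWords_getD _ hw]
    have hlen : (unique ++ [c]).length = unique.length + 1 := by simp
    constructor
    · intro h
      split at h
      · rcases (PySem.Set.mem_add _ _ _).1 h with h' | h'
        · obtain ⟨hi, hwi⟩ := (hmem w i).1 h'
          exact ⟨by omega, by rwa [List.getElem_append_left hi]⟩
        · subst h'
          refine ⟨by omega, ?_⟩
          simp only [List.getElem_concat_length]
          assumption
      · obtain ⟨hi, hwi⟩ := (hmem w i).1 h
        exact ⟨by omega, by rwa [List.getElem_append_left hi]⟩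
    · rintro ⟨hi, hwi⟩
      rw [hlen] at hi
      by_cases hic : i < unique.length
      · rw [List.getElem_append_left hic] at hwi
        have := (hmem w i).2 ⟨hic, hwi⟩
        split
        · exact (PySem.Set.mem_add _ _ _).2 (Or.inl this)
        · exact this
      · have hieq : i = unique.length := by omega
        subst hieq
        simp only [List.getElem_concat_length] at hwi
        split
        · exact (PySem.Set.mem_add _ _ _).2 (Or.inr rfl)
        · exact absurd hwi ‹_›

lemma pvMain (claims : List (List (String × String)))
    (unique : List (List (String × String)))
    (index : PySem.Dict String (PySem.Set Nat)) (hinv : pvInv unique index) :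
    (claims.foldl pvStepB (unique, index)).1 =
      claims.foldl (fun unique c =>
        let words := pvWords c
        if pvIsDupA words unique then unique else unique ++ [c]) unique := by
  induction claims generalizing unique index with
  | nil => rfl
  | cons c cs ih =>
    have hdec := pvDecision_eq unique index hinv (pvWords c)
    simp only [List.foldl_cons]
    cases hdup : pvIsDupA (pvWords c) unique with
    | true =>
      have hstep : pvStepB (unique, index) c = (unique, index) := by
        simp [pvStepB, hdec, hdup]
      rw [hstep, ih unique index hinv]
      simp
    | false =>
      have hstep : pvStepB (unique, index) c =
          (unique ++ [c], pvAddWords index (pvWords c) unique.length) := by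
        simp [pvStepB, hdec, hdup]
      rw [hstep, ih _ _ (pvInv_step unique index hinv c)]
      simp

-- ===== VERDICT (by name: the statement is the Claim_ definition above) =====
theorem deduplicate_claims_spec : Claim_equal_deduplicate_claims := by
  intro claims _ _
  unfold Spec_deduplicate_claims deduplicate_claims deduplicate_claims_alt
  refine (pvMain claims [] PySem.Dict.empty ?_).symm
  constructor
  · intro w; simp [PySem.Dict.getD_empty, PySem.Set.empty]
  · intro w i; simp [PySem.Dict.getD_empty, PySem.Set.empty]
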